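-- pv_equiv track=rewrite | github.com/jrescalona96/truss-solver | main.py | dict_converter
-- ===== SOURCE A (Python) =====
-- def dict_converter(input_list):
--     output_list = []
--     counter = 0
--
--     for index, value in enumerate(input_list):
--         if index % 2 == 0:
--             temp = {}
--             temp['x'] = value[0]
--         else:
--             temp['y'] = value[0]
--             output_list.append(temp)
--
--     return output_list
-- ===== SOURCE B (Python) =====
-- def dict_converter(input_list):
--     # stage 1: extract the first coordinate of every entry (column of values)
--     firsts = [row[0] for row in input_list]
--     # stage 2: pair the even-index column with the odd-index column
--     return [{'x': x, 'y': y} for x, y in zip(firsts[::2], firsts[1::2])]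
-- ===== Notes on version B (the rewrite author's own statement) =====
-- stated objective: alternative
-- what changed: B is staged: a first pass extracts every entry's first coordinate into a flat column, then the even-index and odd-index stride slices of that column are zipped into the dicts, replacing A's single pass with an index-parity branch and a carried mutable temp dict.
import Mathlib
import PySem

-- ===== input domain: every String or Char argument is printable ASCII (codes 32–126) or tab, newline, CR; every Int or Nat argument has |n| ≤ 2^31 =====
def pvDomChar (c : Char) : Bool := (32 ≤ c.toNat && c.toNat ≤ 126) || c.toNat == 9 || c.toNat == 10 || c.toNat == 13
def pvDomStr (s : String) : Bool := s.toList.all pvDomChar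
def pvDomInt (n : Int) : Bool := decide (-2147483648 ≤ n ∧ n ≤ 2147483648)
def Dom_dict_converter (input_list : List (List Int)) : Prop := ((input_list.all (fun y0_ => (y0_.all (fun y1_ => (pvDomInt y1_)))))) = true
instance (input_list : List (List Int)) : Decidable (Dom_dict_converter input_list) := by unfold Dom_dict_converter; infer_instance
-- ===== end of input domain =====

-- B is staged: pass 1 extracts every entry's first coordinate into a flat column, pass 2 zips the
-- even-index and odd-index stride slices of that column into the dicts; same value wherever A returns.

-- ===== PORT A =====
-- loop of A: carries the running index, the current temp dict and the output accumulator.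
-- value[0] is ported as (pyGet? v 0).getD 0: the IndexError case (v = []) is excluded by Pre_.
def dcLoopA (l : List (List Int)) (idx : Int) (temp : PySem.Dict String Int)
    (acc : List (List (String × Int))) : List (List (String × Int)) :=
  match l with
  | [] => acc
  | v :: rest =>
    if idx % 2 == 0 then
      dcLoopA rest (idx + 1) ((PySem.Dict.empty).insert "x" ((PySem.List.pyGet? v 0).getD 0)) acc
    else
      let temp' := temp.insert "y" ((PySem.List.pyGet? v 0).getD 0)
      dcLoopA rest (idx + 1) temp' (acc ++ [temp'.items])

def dict_converter (input_list : List (List Int)) : List (List (String × Int)) :=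
  dcLoopA input_list 0 PySem.Dict.empty []

-- ===== PORT B =====
-- stage 1 of Source B: firsts = [row[0] for row in input_list]
def dcFirsts (l : List (List Int)) : List Int :=
  l.map (fun row => (PySem.List.pyGet? row 0).getD 0)

-- stage 2 of Source B: zip(firsts[::2], firsts[1::2]) built into the dicts
def dict_converter_alt (input_list : List (List Int)) : List (List (String × Int)) :=
  (((PySem.List.slice? (dcFirsts input_list) none none 2).getD []).zip
      ((PySem.List.slice? (dcFirsts input_list) (some 1) none 2).getD [])).map
    (fun p => [("x", p.1), ("y", p.2)])

-- ===== PRECONDITION & SPEC =====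
-- A evaluates value[0] on every element, so it raises IndexError iff some element is empty.
def Pre_dict_converter (input_list : List (List Int)) : Prop :=
  ∀ v ∈ input_list, v ≠ []
instance (input_list : List (List Int)) : Decidable (Pre_dict_converter input_list) := by
  unfold Pre_dict_converter; infer_instance

def pvWitness_dict_converter : List (List Int) := [[1], [2], [3], [4]]

def Spec_dict_converter (input_list : List (List Int)) (out : List (List (String × Int))) : Prop :=
  out = dict_converter_alt input_list
instance (input_list : List (List Int)) (out : List (List (String × Int))) : Decidable (Spec_dict_converter input_list out) := by
  unfold Spec_dict_converter; infer_instance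

-- ===== CLAIM (what is proved, stated in full; the proofs are below) =====
def Claim_equal_dict_converter : Prop := ∀ (input_list : List (List Int)), Dom_dict_converter input_list → Pre_dict_converter input_list → Spec_dict_converter input_list (dict_converter input_list)

-- ===== LEMMAS AND PROOFS =====

-- common reference value: consecutive pairs of the extracted column
def dcPairs (l : List Int) : List (List (String × Int)) :=
  match l with
  | a :: b :: rest => [("x", a), ("y", b)] :: dcPairs rest
  | _ => []

-- every-other-element of a list (what a [::2] stride slice selects)
def dcEvens {α : Type} (l : List α) : List α :=
  match l with
  | [] => []
  | [a] => [a]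
  | a :: _ :: rest => a :: dcEvens rest

lemma filterMap_get2 {α : Type} (xs : List α) :
    List.filterMap (fun k => xs[2 * k]?) (List.range ((xs.length + 1) / 2)) = dcEvens xs := by
  induction xs using dcEvens.induct with
  | case1 => simp [dcEvens]
  | case2 a => simp [dcEvens]
  | case3 a b rest ih =>
      have hlen : ((a :: b :: rest).length + 1) / 2 = (rest.length + 1) / 2 + 1 := by
        simp; omega
      rw [hlen, List.range_succ_eq_map]
      rw [List.filterMap_cons, List.filterMap_map]
      have h0 : (a :: b :: rest)[2 * 0]? = some a := rfl
      rw [h0]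
      have hfun : ∀ k ∈ List.range ((rest.length + 1) / 2),
          ((fun k => (a :: b :: rest)[2 * k]?) ∘ (fun i => i + 1)) k = rest[2 * k]? := by
        intro k _
        show (a :: b :: rest)[2 * (k + 1)]? = rest[2 * k]?
        have : 2 * (k + 1) = (2 * k) + 2 := by omega
        rw [this]
        rfl
      rw [List.filterMap_congr hfun]
      rw [ih]
      rfl

lemma slice2_even {α : Type} (xs : List α) :
    PySem.List.slice? xs none none 2 = some (dcEvens xs) := by
  rw [PySem.List.slice?, PySem.List.sliceIndices]
  simp only [if_neg (by norm_num : ¬ (2:Int) = 0), if_neg (by norm_num : ¬ (2:Int) < 0)]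
  congr 1
  rw [← filterMap_get2]
  rcases Nat.eq_zero_or_pos xs.length with h | h
  · simp [h]
  · have hc : (0:Int) < xs.length := by exact_mod_cast h
    simp only [if_pos (by norm_num : (0:Int) < 2), if_pos hc]
    have hcount : (((xs.length : Int) - 0 + 2 - 1) / 2).toNat = (xs.length + 1) / 2 := by
      omega
    rw [hcount]
    apply List.filterMap_congr
    intro k _
    have : ((0:Int) + 2 * (k:Int)).toNat = 2 * k := by omega
    rw [this]

lemma slice2_odd {α : Type} (xs : List α) :
    PySem.List.slice? xs (some 1) none 2 = some (dcEvens xs.tail) := by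
  rw [PySem.List.slice?, PySem.List.sliceIndices]
  simp only [if_neg (by norm_num : ¬ (2:Int) = 0), if_neg (by norm_num : ¬ (2:Int) < 0),
    if_neg (by norm_num : ¬ (1:Int) < 0)]
  congr 1
  rw [← filterMap_get2]
  rcases Nat.eq_zero_or_pos xs.length with h | h
  · match xs, h with
    | [], _ => simp
  · have h1 : min (1:Int) (xs.length : Int) = 1 := by omega
    rw [h1]
    have htail : xs.tail.length = xs.length - 1 := by simp
    rcases Nat.lt_or_ge 1 xs.length with h2 | h2
    · have hc : (1:Int) < (xs.length : Int) := by exact_mod_cast h2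
      simp only [if_pos (by norm_num : (0:Int) < 2), if_pos hc]
      have hcount : (((xs.length : Int) - 1 + 2 - 1) / 2).toNat = (xs.tail.length + 1) / 2 := by
        rw [htail]; omega
      rw [hcount]
      apply List.filterMap_congr
      intro k _
      have hidx : ((1:Int) + 2 * (k:Int)).toNat = 1 + 2 * k := by omega
      rw [hidx]
      show xs[1 + 2 * k]? = xs.tail[2 * k]?
      rw [← List.getElem?_drop]
      simp
    · have hx1 : xs.length = 1 := by omega
      obtain ⟨a, rfl⟩ : ∃ a, xs = [a] := by
        cases xs with
        | nil => simp at hx1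
        | cons a t =>
            cases t with
            | nil => exact ⟨a, rfl⟩
            | cons b t' => simp at hx1
      norm_num

lemma zip_evens_eq_pairs (l : List Int) :
    ((dcEvens l).zip (dcEvens l.tail)).map
        (fun p => ([("x", p.1), ("y", p.2)] : List (String × Int))) = dcPairs l := by
  induction l using dcPairs.induct with
  | case1 a b rest ih =>
      show ((a :: dcEvens rest).zip (dcEvens (b :: rest))).map _ = _
      match rest, ih with
      | [], _ => simp [dcEvens, dcPairs]
      | c :: rest', ih =>
          show ((a :: dcEvens (c :: rest')).zip (b :: dcEvens ((c :: rest').tail))).map _ = _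
          simp only [List.zip_cons_cons, List.map_cons]
          rw [ih]
          rfl
  | case2 l hne =>
      match l, hne with
      | [], _ => rfl
      | [a], _ => rfl
      | a :: b :: r, hne => exact absurd rfl (hne a b r)

lemma alt_eq_pairs (l : List (List Int)) :
    dict_converter_alt l = dcPairs (dcFirsts l) := by
  unfold dict_converter_alt
  rw [slice2_even, slice2_odd]
  exact zip_evens_eq_pairs (dcFirsts l)

-- main invariant for A: from an even index, A's loop appends exactly the pair list of the column.
lemma dcLoopA_eq (l : List (List Int)) :
    ∀ (idx : Int) (temp : PySem.Dict String Int) (acc : List (List (String × Int))),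
      idx % 2 = 0 → dcLoopA l idx temp acc = acc ++ dcPairs (dcFirsts l) := by
  induction l using dcEvens.induct with
  | case3 a b rest ih =>
      intro idx temp acc h
      have h1 : ((idx + 1) % 2 == 0) = false := by
        simp only [beq_eq_false_iff_ne]; omega
      rw [dcLoopA]
      simp only [h, beq_self_eq_true, if_pos]
      rw [dcLoopA]
      simp only [h1, Bool.false_eq_true, if_false]
      rw [ih (idx + 1 + 1) _ _ (by omega)]
      simp [dcPairs, dcFirsts, PySem.Dict.insert, PySem.Dict.empty]
  | case1 =>
      intro idx temp acc h
      simp [dcLoopA, dcPairs, dcFirsts]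
  | case2 a =>
      intro idx temp acc h
      rw [dcLoopA]
      simp only [h, beq_self_eq_true, if_pos]
      simp [dcLoopA, dcPairs, dcFirsts]

-- ===== VERDICT =====
theorem dict_converter_spec : Claim_equal_dict_converter := by
  intro l _ _
  unfold Spec_dict_converter dict_converter
  rw [alt_eq_pairs]
  exact dcLoopA_eq l 0 PySem.Dict.empty [] rfl
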